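-- pv_equiv track=rewrite | github.com/kylehench/Python-Public | algo-practice/033_anagram.py | anagram1
-- ===== SOURCE A (Python) =====
-- def anagram1(s):
--   if len(s)%2 != 0:
--     return -1
--   b = {}
--   for ch in s[int(len(s)/2):]:
--     if ch in b:
--       b[ch] += 1
--     else:
--       b[ch] = 1
--   uncommon = 0
--   for ch in s[:int(len(s)/2)]:
--     if ch in b:
--       if b[ch] == 1:
--         del b[ch]
--       else:
--         b[ch] -= 1
--     else:
--       uncommon += 1
--   return uncommon
-- ===== SOURCE B (Python) =====
-- def anagram1(s):
--     # Count, per distinct first-half character, how many of its occurrences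
--     # the second half cannot cover (multiset difference), instead of greedily
--     # consuming a mutable tally dict.
--     if len(s) % 2 != 0:
--         return -1
--     h = len(s) // 2
--     first, second = list(s[:h]), list(s[h:])
--     return sum(max(0, first.count(c) - second.count(c)) for c in set(first))
-- ===== Notes on version B (the rewrite author's own statement) =====
-- stated objective: simpler
-- what changed: Replaces A's mutable tally dict with greedy consume/delete/decrement loop by a direct multiset-difference computation: sum over the distinct first-half characters of max(0, count-in-first-half minus count-in-second-half).
import Mathlib
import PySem

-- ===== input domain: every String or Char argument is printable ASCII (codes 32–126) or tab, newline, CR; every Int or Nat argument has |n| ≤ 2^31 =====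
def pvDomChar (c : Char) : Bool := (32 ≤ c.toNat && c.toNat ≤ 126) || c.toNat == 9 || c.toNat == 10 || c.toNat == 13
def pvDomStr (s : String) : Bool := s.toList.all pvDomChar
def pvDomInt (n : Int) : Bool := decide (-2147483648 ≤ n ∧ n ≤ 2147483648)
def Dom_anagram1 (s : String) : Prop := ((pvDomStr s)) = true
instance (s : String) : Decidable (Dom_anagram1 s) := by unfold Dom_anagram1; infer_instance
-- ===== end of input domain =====

-- B replaces A's mutable tally dict (greedy consume/delete/decrement) by a direct
-- multiset-difference sum over the distinct first-half characters (objective: simpler).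

-- ===== PORT A =====
-- 'int(len(s)/2)' is ported as floor division by 2: on the even lengths that reach it
-- the two coincide exactly.
def anagram1 (s : String) : Int :=
  if PySem.Int.mod (PySem.Str.len s) 2 ≠ 0 then -1
  else
    let half := PySem.Int.floordiv (PySem.Str.len s) 2
    let b := (PySem.List.slice s.toList (some half) none).foldl
      (fun (b : PySem.Dict Char Int) ch =>
        if b.contains ch then b.modify ch 0 (· + 1) else b.insert ch 1)
      PySem.Dict.empty
    let r := (PySem.List.slice s.toList none (some half)).foldl
      (fun (st : PySem.Dict Char Int × Int) ch =>
        if st.1.contains ch then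
          if st.1.getD ch 0 = 1 then (st.1.erase ch, st.2)
          else (st.1.modify ch 0 (· - 1), st.2)
        else (st.1, st.2 + 1))
      (b, 0)
    r.2

-- ===== PORT B =====
def anagram1_alt (s : String) : Int :=
  if PySem.Int.mod (PySem.Str.len s) 2 ≠ 0 then -1
  else
    let h := PySem.Int.floordiv (PySem.Str.len s) 2
    let first := PySem.List.slice s.toList none (some h)
    let second := PySem.List.slice s.toList (some h) none
    ((PySem.Set.ofList first).map
      (fun c => max 0 ((first.count c : Int) - (second.count c : Int)))).sum

-- ===== PRECONDITION & SPEC =====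
def Spec_anagram1 (s : String) (out : Int) : Prop := out = anagram1_alt s
instance (s : String) (out : Int) : Decidable (Spec_anagram1 s out) := by unfold Spec_anagram1; infer_instance

-- ===== CLAIM (what is proved, stated in full; the proofs are below) =====
def Claim_equal_anagram1 : Prop := ∀ (s : String), Dom_anagram1 s → Spec_anagram1 s (anagram1 s)

-- ===== LEMMAS AND PROOFS =====

-- residual count of A's consuming loop, at the level of the remaining second-half multiset
def pvRes : List Char → List Char → Int
  | [], _ => 0
  | c :: l, m => if c ∈ m then pvRes l (m.erase c) else pvRes l m + 1

theorem pv_find?_filter (c k : Char) (items : List (Char × Int)) :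
    List.find? (fun p => p.1 == c) (items.filter (fun p => !(p.1 == k)))
      = if c = k then none else List.find? (fun p => p.1 == c) items := by
  induction items with
  | nil => simp
  | cons p rest ih =>
    by_cases hpk : p.1 = k
    · rw [List.filter_cons_of_neg (by simp [hpk]), ih]
      by_cases hck : c = k
      · simp [hck]
      · rw [if_neg hck, if_neg hck,
          List.find?_cons_of_neg (by simp only [hpk, beq_iff_eq]; exact fun h => hck h.symm)]
    · rw [List.filter_cons_of_pos (by simp [hpk])]
      by_cases hpc : p.1 = c
      · have hck : ¬ c = k := fun h => hpk (by rw [hpc, h])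
        rw [List.find?_cons_of_pos (by simp [hpc]), List.find?_cons_of_pos (by simp [hpc]),
            if_neg hck]
      · rw [List.find?_cons_of_neg (by simp [hpc]), List.find?_cons_of_neg (by simp [hpc]), ih]

theorem pv_get?_erase (d : PySem.Dict Char Int) (k c : Char) :
    (d.erase k).get? c = if c = k then none else d.get? c := by
  rcases d with ⟨items⟩
  simp only [PySem.Dict.erase, PySem.Dict.get?, pv_find?_filter]
  split_ifs <;> rfl

theorem pv_counter_get? (xs : List Char) (c : Char) :
    (PySem.Dict.counter xs).get? c
      = if 0 < xs.count c then some (xs.count c : Int) else none := by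
  by_cases hm : c ∈ xs
  · have hc : (PySem.Dict.counter xs).contains c = true := by
      rw [PySem.Dict.contains_counter]; simpa using hm
    rw [PySem.Dict.contains_eq_isSome_get?] at hc
    rcases ho : (PySem.Dict.counter xs).get? c with _ | v
    · rw [ho] at hc; simp at hc
    · have hd := PySem.Dict.getD_counter xs c
      rw [PySem.Dict.getD_eq_get?_getD, ho] at hd
      simp at hd
      rw [if_pos (List.count_pos_iff.mpr hm), hd]
  · have hcount : xs.count c = 0 := List.count_eq_zero.mpr hm
    have hc : (PySem.Dict.counter xs).contains c = false := by
      rw [PySem.Dict.contains_counter]; simpa using hm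
    rw [PySem.Dict.contains_eq_isSome_get?] at hc
    rcases ho : (PySem.Dict.counter xs).get? c with _ | v
    · simp [hcount]
    · rw [ho] at hc; simp at hc

theorem pv_build_eq_counter (sec : List Char) :
    sec.foldl (fun (b : PySem.Dict Char Int) ch =>
        if b.contains ch then b.modify ch 0 (· + 1) else b.insert ch 1)
      PySem.Dict.empty = PySem.Dict.counter sec := by
  rw [PySem.Dict.counter_eq_foldl]
  apply PySem.List.foldl_congr_mem
  intro d ch _
  by_cases hc : d.contains ch = true
  · simp [hc]
  · have h0 : d.getD ch 0 = 0 := PySem.Dict.getD_of_not_contains d (0 : Int) (by simpa using hc)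
    simp [hc, PySem.Dict.modify, h0]

theorem pv_loop_spec (l : List Char) :
    ∀ (d : PySem.Dict Char Int) (m : List Char) (u : Int),
    (∀ c, d.get? c = if 0 < m.count c then some (m.count c : Int) else none) →
    (l.foldl (fun (st : PySem.Dict Char Int × Int) ch =>
        if st.1.contains ch then
          if st.1.getD ch 0 = 1 then (st.1.erase ch, st.2)
          else (st.1.modify ch 0 (· - 1), st.2)
        else (st.1, st.2 + 1)) (d, u)).2 = u + pvRes l m := by
  induction l with
  | nil => intro d m u _; simp [pvRes]
  | cons c l ih =>
    intro d m u hR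
    rw [List.foldl_cons]
    by_cases hm : c ∈ m
    · have hpos : 0 < m.count c := List.count_pos_iff.mpr hm
      have hget : d.get? c = some (m.count c : Int) := by rw [hR c, if_pos hpos]
      have hcont : d.contains c = true := by
        rw [PySem.Dict.contains_eq_isSome_get?, hget]; rfl
      have hgetD : d.getD c 0 = (m.count c : Int) := by
        rw [PySem.Dict.getD_eq_get?_getD, hget]; rfl
      by_cases h1 : m.count c = 1
      · have : d.getD c 0 = 1 := by rw [hgetD, h1]; rfl
        simp only [hcont, if_true, this]
        rw [ih (d.erase c) (m.erase c) u ?_]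
        · simp [pvRes, hm]
        · intro x
          rw [pv_get?_erase]
          by_cases hx : x = c
          · subst hx
            rw [if_pos rfl, List.count_erase_self, h1]
            simp
          · rw [if_neg hx, hR x, List.count_erase_of_ne hx]
      · have hne : d.getD c 0 ≠ 1 := by
          rw [hgetD]; exact_mod_cast h1
        simp only [hcont, if_true, if_neg hne]
        rw [ih (d.modify c 0 (· - 1)) (m.erase c) u ?_]
        · simp [pvRes, hm]
        · intro x
          have h2 : 2 ≤ m.count c := by omega
          rw [PySem.Dict.modify, PySem.Dict.get?_insert]
          by_cases hx : x = c
          · subst hx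
            rw [if_pos rfl, hgetD, List.count_erase_self,
                if_pos (by omega : 0 < m.count x - 1)]
            congr 1
            push_cast [Nat.cast_sub (by omega : 1 ≤ m.count x)]
            ring
          · rw [if_neg hx, hR x, List.count_erase_of_ne hx]
    · have hcount : m.count c = 0 := List.count_eq_zero.mpr hm
      have hcont : d.contains c = false := by
        rw [PySem.Dict.contains_eq_isSome_get?, hR c, hcount]; rfl
      simp only [hcont, Bool.false_eq_true, if_false]
      rw [ih d m (u + 1) hR]
      simp [pvRes, hm]
      ring

theorem pv_ms_mem (l m : List Char) (c : Char) (h : c ∈ m) :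
    ((c :: l : List Char) : Multiset Char) - (m : Multiset Char)
      = ((l : Multiset Char) - ((m.erase c : List Char) : Multiset Char)) := by
  have hpos : 0 < m.count c := List.count_pos_iff.mpr h
  ext a
  rw [Multiset.count_sub, Multiset.count_sub, Multiset.coe_count, Multiset.coe_count,
      Multiset.coe_count, Multiset.coe_count]
  simp only [List.count_cons, List.count_erase, beq_iff_eq]
  by_cases ha : a = c
  · subst ha; simp; omega
  · have hca : ¬ c = a := fun hh => ha hh.symm
    simp [hca]

theorem pv_ms_not_mem (l m : List Char) (c : Char) (h : ¬ c ∈ m) :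
    ((c :: l : List Char) : Multiset Char) - (m : Multiset Char)
      = c ::ₘ ((l : Multiset Char) - (m : Multiset Char)) := by
  have hz : m.count c = 0 := List.count_eq_zero.mpr h
  ext a
  rw [Multiset.count_cons, Multiset.count_sub, Multiset.count_sub, Multiset.coe_count,
      Multiset.coe_count, Multiset.coe_count]
  simp only [List.count_cons, beq_iff_eq]
  by_cases ha : a = c
  · subst ha; simp [hz]
  · have hca : ¬ c = a := fun hh => ha hh.symm
    simp [hca, ha]

theorem pv_res_card (l : List Char) :
    ∀ m : List Char, pvRes l m = (((l : Multiset Char) - (m : Multiset Char)).card : Int) := by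
  induction l with
  | nil => intro m; simp [pvRes]
  | cons c l ih =>
    intro m
    by_cases hm : c ∈ m
    · rw [pv_ms_mem l m c hm]
      simp [pvRes, hm, ih]
    · rw [pv_ms_not_mem l m c hm]
      simp [pvRes, hm, ih]

theorem pv_sum_card (f sec : List Char) :
    ((PySem.Set.ofList f).map
        (fun c => max 0 ((f.count c : Int) - (sec.count c : Int)))).sum
      = (((f : Multiset Char) - (sec : Multiset Char)).card : Int) := by
  have hfun : ∀ c ∈ PySem.Set.ofList f,
      max 0 ((f.count c : Int) - (sec.count c : Int))
        = ((f.count c - sec.count c : ℕ) : Int) := by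
    intro c _
    omega
  rw [List.map_congr_left hfun]
  rw [← List.sum_toFinset _ (PySem.Set.nodup_ofList f)]
  have htf : (PySem.Set.ofList f).toFinset = f.toFinset := by
    ext a
    simp [List.mem_toFinset, PySem.Set.mem_ofList]
  rw [htf]
  have hcnt : ∀ a, ((f : Multiset Char) - (sec : Multiset Char)).count a
      = f.count a - sec.count a := by
    intro a
    rw [Multiset.count_sub, Multiset.coe_count, Multiset.coe_count]
  have hsub : ((f : Multiset Char) - (sec : Multiset Char)).toFinset ⊆ f.toFinset := by
    intro a ha
    rw [Multiset.mem_toFinset] at ha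
    have hp := Multiset.count_pos.mpr ha
    rw [hcnt] at hp
    rw [List.mem_toFinset]
    exact List.count_pos_iff.mp (by omega)
  have hz : ∀ x ∈ f.toFinset, x ∉ ((f : Multiset Char) - (sec : Multiset Char)).toFinset →
      f.count x - sec.count x = 0 := by
    intro a _ hna
    rw [Multiset.mem_toFinset] at hna
    have h0 := Multiset.count_eq_zero.mpr hna
    rw [hcnt] at h0
    omega
  have hnat : ∑ c ∈ f.toFinset, (f.count c - sec.count c)
      = ((f : Multiset Char) - (sec : Multiset Char)).card :=
    calc ∑ c ∈ f.toFinset, (f.count c - sec.count c)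
        = ∑ c ∈ ((f : Multiset Char) - (sec : Multiset Char)).toFinset,
            (f.count c - sec.count c) := (Finset.sum_subset hsub hz).symm
      _ = ∑ c ∈ ((f : Multiset Char) - (sec : Multiset Char)).toFinset,
            ((f : Multiset Char) - (sec : Multiset Char)).count c :=
          Finset.sum_congr rfl (fun a _ => (hcnt a).symm)
      _ = ((f : Multiset Char) - (sec : Multiset Char)).card :=
          Multiset.toFinset_sum_count_eq _
  rw [← Nat.cast_sum, hnat]

theorem pv_key (f sec : List Char) :
    (f.foldl (fun (st : PySem.Dict Char Int × Int) ch =>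
        if st.1.contains ch then
          if st.1.getD ch 0 = 1 then (st.1.erase ch, st.2)
          else (st.1.modify ch 0 (· - 1), st.2)
        else (st.1, st.2 + 1))
      (sec.foldl (fun (b : PySem.Dict Char Int) ch =>
          if b.contains ch then b.modify ch 0 (· + 1) else b.insert ch 1)
        PySem.Dict.empty, 0)).2
    = ((PySem.Set.ofList f).map
        (fun c => max 0 ((f.count c : Int) - (sec.count c : Int)))).sum := by
  rw [pv_build_eq_counter]
  rw [pv_loop_spec f (PySem.Dict.counter sec) sec 0 (pv_counter_get? sec)]
  rw [pv_res_card, pv_sum_card]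
  ring

-- ===== VERDICT (by name: the statement is the Claim_ definition above) =====
theorem anagram1_spec : Claim_equal_anagram1 := by
  unfold Claim_equal_anagram1
  intro s _
  unfold Spec_anagram1 anagram1 anagram1_alt
  by_cases h : PySem.Int.mod (PySem.Str.len s) 2 ≠ 0
  · rw [if_pos h, if_pos h]
  · rw [if_neg h, if_neg h]
    exact pv_key _ _
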